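-- pv_equiv track=rewrite | github.com/geralq/BIG-DATA | book_manager.py | __metadata_content_divider
-- ===== SOURCE A (Python) =====
-- def __metadata_content_divider(lines):
--     for idx, line in enumerate(lines):
--         if line.startswith('***'):
--             metadata = lines[:idx]
--             content = lines[idx+1:]
--         if line.startswith('Title: '):
--             title = line[len('Title: '):].strip()
--     return metadata, content, title
-- ===== SOURCE B (Python) =====
-- def __metadata_content_divider(lines):
--     for i in range(len(lines) - 1, -1, -1):
--         if lines[i].startswith('***'):
--             metadata = lines[:i]
--             content = lines[i + 1:]
--             break
--     for i in range(len(lines) - 1, -1, -1):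
--         if lines[i].startswith('Title: '):
--             title = lines[i][len('Title: '):].strip()
--             break
--     return metadata, content, title
-- ===== Notes on version B (the rewrite author's own statement) =====
-- stated objective: alternative
-- what changed: Replaces A's single forward pass that overwrites its variables on every match with two independent reverse scans that stop at the first (i.e. last-in-order) matching line each.
import Mathlib
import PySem

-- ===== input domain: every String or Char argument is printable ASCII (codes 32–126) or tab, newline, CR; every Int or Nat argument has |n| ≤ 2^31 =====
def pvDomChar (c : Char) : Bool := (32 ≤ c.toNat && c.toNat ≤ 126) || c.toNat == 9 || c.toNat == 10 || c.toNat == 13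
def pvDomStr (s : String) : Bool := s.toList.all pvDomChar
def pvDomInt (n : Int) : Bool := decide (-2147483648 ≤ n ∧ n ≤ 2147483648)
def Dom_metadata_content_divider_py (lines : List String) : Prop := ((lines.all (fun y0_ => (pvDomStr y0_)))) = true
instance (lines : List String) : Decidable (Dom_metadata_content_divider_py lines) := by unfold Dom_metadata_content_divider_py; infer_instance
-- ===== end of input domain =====

-- B replaces A's single forward overwrite pass by two independent reverse scans that each stop
-- at the last matching line (objective: alternative decomposition, same cost).

-- ===== PORT A =====
-- A's single forward loop; the not-yet-assigned state of `metadata`/`content` and `title` is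
-- `none` (Python would raise UnboundLocalError at the return if it is still unset; those inputs
-- are outside Pre_; the `.getD` defaults there are never claimed about).
def metadata_content_divider_py (lines : List String) : List String × List String × String :=
  let st := (PySem.List.enumerate lines 0).foldl
    (fun (st : Option (List String × List String) × Option String) p =>
      let st1 := if PySem.Str.startswith p.2 "***" then
          some (PySem.List.slice lines none (some p.1), PySem.List.slice lines (some (p.1 + 1)) none)
        else st.1
      let st2 := if PySem.Str.startswith p.2 "Title: " then
          some (PySem.Str.strip (PySem.Str.slice p.2 (some 7) none))
        else st.2
      (st1, st2)) (none, none)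
  ((st.1.getD ([], [])).1, (st.1.getD ([], [])).2, st.2.getD "")

-- ===== PORT B =====
-- first reverse loop of Source B: `for i in range(len(lines)-1, -1, -1): if lines[i].startswith('***'): …; break`
def altFindSplit (lines : List String) : Nat → Option (List String × List String)
  | 0 => none
  | i + 1 =>
    if PySem.Str.startswith (lines.getD i "") "***" then
      some (lines.take i, lines.drop (i + 1))
    else altFindSplit lines i

-- second reverse loop of Source B
def altFindTitle (lines : List String) : Nat → Option String
  | 0 => none
  | i + 1 =>
    if PySem.Str.startswith (lines.getD i "") "Title: " then
      some (PySem.Str.strip (PySem.Str.slice (lines.getD i "") (some 7) none))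
    else altFindTitle lines i

def metadata_content_divider_py_alt (lines : List String) : List String × List String × String :=
  let mc := altFindSplit lines lines.length
  let t := altFindTitle lines lines.length
  ((mc.getD ([], [])).1, (mc.getD ([], [])).2, t.getD "")

-- ===== PRECONDITION & SPEC =====
-- Pre_ excludes exactly the inputs on which Python A raises UnboundLocalError: those with no
-- line starting with '***' or no line starting with 'Title: '.
def Pre_metadata_content_divider_py (lines : List String) : Prop :=
  (∃ l ∈ lines, PySem.Str.startswith l "***" = true) ∧
  (∃ l ∈ lines, PySem.Str.startswith l "Title: " = true)
instance (lines : List String) : Decidable (Pre_metadata_content_divider_py lines) := by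
  unfold Pre_metadata_content_divider_py; infer_instance
def pvWitness_metadata_content_divider_py : List String := ["Title: A Book ", "*** START ***", "text"]

def Spec_metadata_content_divider_py (lines : List String) (out : List String × List String × String) : Prop := out = metadata_content_divider_py_alt lines
instance (lines : List String) (out : List String × List String × String) : Decidable (Spec_metadata_content_divider_py lines out) := by unfold Spec_metadata_content_divider_py; infer_instance

-- ===== CLAIM (what is proved, stated in full; the proofs are below) =====
def Claim_equal_metadata_content_divider_py : Prop := ∀ (lines : List String), Dom_metadata_content_divider_py lines → Pre_metadata_content_divider_py lines → Spec_metadata_content_divider_py lines (metadata_content_divider_py lines)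

-- ===== LEMMAS AND PROOFS =====

-- proof-only helper: the last index i (within the scanned list) whose element satisfies p,
-- together with the payload f i x computed there
def lastHit {α : Type} (p : String → Bool) (f : Nat → String → α) : Nat → List String → Option α
  | _, [] => none
  | i, x :: xs =>
    match lastHit p f (i + 1) xs with
    | some v => some v
    | none => if p x then some (f i x) else none

lemma lastHit_congr {α : Type} (p : String → Bool) (f g : Nat → String → α)
    (h : ∀ j x, f j x = g j x) : ∀ (xs : List String) (i : Nat),
    lastHit p f i xs = lastHit p g i xs := by
  intro xs
  induction xs with
  | nil => intro i; rfl
  | cons x xs ih =>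
    intro i
    simp only [lastHit, ih (i + 1), h]

lemma lastHit_append_singleton {α : Type} (p : String → Bool) (f : Nat → String → α)
    (x : String) : ∀ (l : List String) (i : Nat),
    lastHit p f i (l ++ [x]) =
      ((if p x then some (f (i + l.length) x) else none).or (lastHit p f i l)) := by
  intro l
  induction l with
  | nil =>
    intro i
    simp only [List.nil_append, lastHit, List.length_nil, Nat.add_zero]
    cases hp : p x <;> simp
  | cons y l ih =>
    intro i
    simp only [List.cons_append, lastHit, ih (i + 1), List.length_cons]
    have harith : i + 1 + l.length = i + (l.length + 1) := by omega
    rw [harith]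
    cases hp : p x <;> cases hl : lastHit p f (i + 1) l <;> simp

-- A's forward fold computes (last '***' payload, last 'Title: ' payload), seeded states as fallback
lemma foldA_eq (lines : List String) :
    ∀ (xs : List String) (i : Nat) (stM : Option (List String × List String)) (stT : Option String),
    (PySem.List.enumerate xs (i : Int)).foldl
      (fun (st : Option (List String × List String) × Option String) p =>
        let st1 := if PySem.Str.startswith p.2 "***" then
            some (PySem.List.slice lines none (some p.1), PySem.List.slice lines (some (p.1 + 1)) none)
          else st.1
        let st2 := if PySem.Str.startswith p.2 "Title: " then
            some (PySem.Str.strip (PySem.Str.slice p.2 (some 7) none))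
          else st.2
        (st1, st2)) (stM, stT)
    = ((lastHit (fun x => PySem.Str.startswith x "***")
          (fun n _ => (PySem.List.slice lines none (some (n : Int)),
                       PySem.List.slice lines (some ((n : Int) + 1)) none)) i xs).or stM,
       (lastHit (fun x => PySem.Str.startswith x "Title: ")
          (fun _ x => PySem.Str.strip (PySem.Str.slice x (some 7) none)) i xs).or stT) := by
  intro xs
  induction xs with
  | nil => intro i stM stT; simp [PySem.List.enumerate_nil, lastHit]
  | cons x xs ih =>
    intro i stM stT
    rw [PySem.List.enumerate_cons, List.foldl_cons]
    have hcast : (i : Int) + 1 = ((i + 1 : Nat) : Int) := by push_cast; ring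
    rw [hcast, ih (i + 1)]
    simp only [lastHit]
    cases hM : lastHit (fun x => PySem.Str.startswith x "***")
        (fun n _ => (PySem.List.slice lines none (some (n : Int)),
                     PySem.List.slice lines (some ((n : Int) + 1)) none)) (i + 1) xs <;>
      cases hT : lastHit (fun x => PySem.Str.startswith x "Title: ")
        (fun _ x => PySem.Str.strip (PySem.Str.slice x (some 7) none)) (i + 1) xs <;>
      cases h1 : PySem.Str.startswith x "***" <;>
      cases h2 : PySem.Str.startswith x "Title: " <;>
      simp

-- B's reverse scans compute the same last-match payloads
lemma altFindSplit_eq (lines : List String) : ∀ (n : Nat), n ≤ lines.length →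
    altFindSplit lines n =
      lastHit (fun x => PySem.Str.startswith x "***")
        (fun n _ => (lines.take n, lines.drop (n + 1))) 0 (lines.take n) := by
  intro n
  induction n with
  | zero => intro _; simp [altFindSplit, lastHit]
  | succ m ih =>
    intro h
    have hm : m < lines.length := by omega
    have htake : lines.take (m + 1) = lines.take m ++ [lines[m]] :=
      List.take_succ_eq_append_getElem hm
    have hgd : lines.getD m "" = lines[m] := List.getD_eq_getElem lines "" hm
    rw [htake, lastHit_append_singleton]
    simp only [altFindSplit, hgd, List.length_take, Nat.min_eq_left (Nat.le_of_lt hm), Nat.zero_add]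
    cases hp : PySem.Str.startswith lines[m] "***" with
    | true => simp
    | false => simp [ih (by omega)]

lemma altFindTitle_eq (lines : List String) : ∀ (n : Nat), n ≤ lines.length →
    altFindTitle lines n =
      lastHit (fun x => PySem.Str.startswith x "Title: ")
        (fun _ x => PySem.Str.strip (PySem.Str.slice x (some 7) none)) 0 (lines.take n) := by
  intro n
  induction n with
  | zero => intro _; simp [altFindTitle, lastHit]
  | succ m ih =>
    intro h
    have hm : m < lines.length := by omega
    have htake : lines.take (m + 1) = lines.take m ++ [lines[m]] :=
      List.take_succ_eq_append_getElem hm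
    have hgd : lines.getD m "" = lines[m] := List.getD_eq_getElem lines "" hm
    rw [htake, lastHit_append_singleton]
    simp only [altFindTitle, hgd]
    cases hp : PySem.Str.startswith lines[m] "Title: " with
    | true => simp
    | false => simp [ih (by omega)]

-- the two split payloads agree: Python slices with nonnegative nat bounds are take/drop
lemma payload_eq (lines : List String) (n : Nat) :
    (PySem.List.slice lines none (some (n : Int)), PySem.List.slice lines (some ((n : Int) + 1)) none)
    = (lines.take n, lines.drop (n + 1)) := by
  have h1 : PySem.List.slice lines none (some (n : Int)) = lines.take n :=
    PySem.List.slice_to_natCast lines n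
  have hc : (n : Int) + 1 = ((n + 1 : Nat) : Int) := by push_cast; ring
  have h2 : PySem.List.slice lines (some ((n : Int) + 1)) none = lines.drop (n + 1) := by
    rw [hc]; exact PySem.List.slice_from_natCast lines (n + 1)
  rw [h1, h2]

-- ===== VERDICT (by name: the statement is the Claim_ definition above) =====
theorem metadata_content_divider_py_spec : Claim_equal_metadata_content_divider_py := by
  intro lines _ _
  unfold Spec_metadata_content_divider_py
  unfold metadata_content_divider_py metadata_content_divider_py_alt
  have h0 : (0 : Int) = ((0 : Nat) : Int) := by norm_num
  rw [h0, foldA_eq lines lines 0 none none,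
      altFindSplit_eq lines lines.length (le_refl _),
      altFindTitle_eq lines lines.length (le_refl _),
      List.take_length,
      lastHit_congr _ _ (fun n _ => (lines.take n, lines.drop (n + 1)))
        (fun j _ => payload_eq lines j) lines 0]
  simp [Option.or_none]
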